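-- pv_equiv track=rewrite | github.com/Bennyhwanggggg/Algorithm-and-Data-Structures-and-Coding-Challenges | Challenges/longestLine.py | findMaxInDiag
-- ===== SOURCE A (Python) =====
-- def findMaxInDiag(M, row, col):
--     count, longest = 0, 0
--     while row < len(M) and col < len(M[0]):
--         if M[row][col] == 1:
--             count += 1
--             longest = max(longest, count)
--         else:
--             count = 0
--         row += 1
--         col += 1
--     return longest
-- ===== SOURCE B (Python) =====
-- def findMaxInDiag(M, row, col):
--     # Pass 1: extract the diagonal with the same while-loop bounds as the original.
--     diag = []
--     while row < len(M) and col < len(M[0]):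
--         diag.append(M[row][col])
--         row += 1
--         col += 1
--     # Pass 2: two-pointer block scan for the longest run of consecutive 1s.
--     best = 0
--     i = 0
--     n = len(diag)
--     while i < n:
--         if diag[i] == 1:
--             j = i
--             while j < n and diag[j] == 1:
--                 j += 1
--             if j - i > best:
--                 best = j - i
--             i = j
--         else:
--             i += 1
--     return best
-- ===== Notes on version B (the rewrite author's own statement) =====
-- stated objective: alternative
-- what changed: A fuses counting into one accumulator loop over matrix indices; B first extracts the diagonal into a list and then finds the longest run of 1s with a two-pointer block scan over that list.
import Mathlib
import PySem

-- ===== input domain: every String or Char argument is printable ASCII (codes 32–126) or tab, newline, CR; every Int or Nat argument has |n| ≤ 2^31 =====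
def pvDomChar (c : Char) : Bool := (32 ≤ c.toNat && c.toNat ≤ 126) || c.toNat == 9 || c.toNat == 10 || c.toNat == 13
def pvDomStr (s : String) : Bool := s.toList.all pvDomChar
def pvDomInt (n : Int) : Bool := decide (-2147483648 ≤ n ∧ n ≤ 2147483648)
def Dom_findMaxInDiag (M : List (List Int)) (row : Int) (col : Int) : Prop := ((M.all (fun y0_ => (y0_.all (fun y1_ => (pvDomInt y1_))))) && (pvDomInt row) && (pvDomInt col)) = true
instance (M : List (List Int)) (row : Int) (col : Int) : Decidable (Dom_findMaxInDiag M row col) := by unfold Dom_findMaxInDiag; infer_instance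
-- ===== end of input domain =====

-- B re-implements A as extract-diagonal-then-block-scan instead of one fused accumulator loop;
-- same cost, alternative decomposition. Equivalence is proved on Pre_ (exactly where Python A
-- returns; elsewhere both Pythons raise IndexError identically).

-- ===== PORT A =====
-- A's while loop; `len(M[0])` is constant through the loop and is passed in as w.
def findMaxInDiagGo (M : List (List Int)) (w : Int) (row col count longest : Int) : Int :=
  if h : row < (M.length : Int) ∧ col < w then
    match (PySem.List.pyGet? M row).bind (fun r => PySem.List.pyGet? r col) with
    | some v =>
      if v = 1 then findMaxInDiagGo M w (row + 1) (col + 1) (count + 1) (max longest (count + 1))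
      else findMaxInDiagGo M w (row + 1) (col + 1) 0 longest
    | none => longest   -- Python raises IndexError here; outside Pre_
  else longest
termination_by ((M.length : Int) - row).toNat
decreasing_by all_goals { obtain ⟨h1, _⟩ := h; omega }

def findMaxInDiag (M : List (List Int)) (row : Int) (col : Int) : Int :=
  findMaxInDiagGo M ((M.headD []).length : Int) row col 0 0

-- ===== PORT B =====
-- pass 1: the same while-loop bounds, collecting the diagonal
def diagOf (M : List (List Int)) (w : Int) (row col : Int) : List Int :=
  if h : row < (M.length : Int) ∧ col < w then
    match (PySem.List.pyGet? M row).bind (fun r => PySem.List.pyGet? r col) with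
    | some v => v :: diagOf M w (row + 1) (col + 1)
    | none => []   -- Python raises IndexError here; outside Pre_
  else []
termination_by ((M.length : Int) - row).toNat
decreasing_by all_goals { obtain ⟨h1, _⟩ := h; omega }

-- inner loop: while j < n and diag[j] == 1: j += 1
def skipOnes (d : List Int) (j : Int) : Int :=
  if h : j < (d.length : Int) ∧ PySem.List.pyGet? d j = some 1 then skipOnes d (j + 1) else j
termination_by ((d.length : Int) - j).toNat
decreasing_by all_goals { obtain ⟨h1, _⟩ := h; omega }

theorem skipOnes_ge (d : List Int) (j : Int) : j ≤ skipOnes d j := by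
  fun_induction skipOnes d j with
  | case1 j h ih => omega
  | case2 j h => omega

-- outer loop of the two-pointer block scan
def blockScan (d : List Int) (i best : Int) : Int :=
  if h : i < (d.length : Int) then
    if h1 : PySem.List.pyGet? d i = some 1 then
      let j := skipOnes d i
      blockScan d j (if j - i > best then j - i else best)
    else blockScan d (i + 1) best
  else best
termination_by ((d.length : Int) - i).toNat
decreasing_by
  · have : i + 1 ≤ skipOnes d (i + 1) := skipOnes_ge d (i + 1)
    have hj : skipOnes d i = skipOnes d (i + 1) := by
      rw [skipOnes]; simp [h, h1]
    omega
  · omega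

def findMaxInDiag_alt (M : List (List Int)) (row : Int) (col : Int) : Int :=
  blockScan (diagOf M ((M.headD []).length : Int) row col) 0 0

-- ===== PRECONDITION & SPEC =====
-- Pre_ holds exactly where Python A returns (A raises IndexError on: M = [] with row < 0, and on
-- diagonal steps whose row/column index falls outside Python's negative-wrap index range).
def Pre_findMaxInDiag (M : List (List Int)) (row : Int) (col : Int) : Prop :=
  (M = [] → 0 ≤ row) ∧
  (M ≠ [] → row < (M.length : Int) → col < ((M.headD []).length : Int) →
    -(M.length : Int) ≤ row ∧
    ∀ k ∈ List.range ((min ((M.length : Int) - row) (((M.headD []).length : Int) - col)).toNat),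
      ((PySem.List.pyGet? M (row + k)).bind
        (fun r => PySem.List.pyGet? r (col + k))).isSome = true)
instance (M : List (List Int)) (row : Int) (col : Int) : Decidable (Pre_findMaxInDiag M row col) := by unfold Pre_findMaxInDiag; infer_instance

def pvWitness_findMaxInDiag : List (List Int) × Int × Int := ([[1, 0], [1, 1]], 0, 0)

def Spec_findMaxInDiag (M : List (List Int)) (row : Int) (col : Int) (out : Int) : Prop := out = findMaxInDiag_alt M row col
instance (M : List (List Int)) (row : Int) (col : Int) (out : Int) : Decidable (Spec_findMaxInDiag M row col out) := by unfold Spec_findMaxInDiag; infer_instance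

-- ===== CLAIM (what is proved, stated in full; the proofs are below) =====
def Claim_equal_findMaxInDiag : Prop := ∀ (M : List (List Int)) (row : Int) (col : Int), Dom_findMaxInDiag M row col → Pre_findMaxInDiag M row col → Spec_findMaxInDiag M row col (findMaxInDiag M row col)

-- ===== LEMMAS AND PROOFS =====

-- A's fused loop, rephrased over the extracted diagonal list
def loopFused : List Int → Int → Int → Int
  | [], _, longest => longest
  | v :: t, count, longest =>
    if v = 1 then loopFused t (count + 1) (max longest (count + 1))
    else loopFused t 0 longest

-- the max run of 1s, with the current run already worth c
def mrc : List Int → Int → Int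
  | [], _ => 0
  | v :: t, c => if v = 1 then max (c + 1) (mrc t (c + 1)) else mrc t 0

-- length of the leading run of 1s
def lead : List Int → Int
  | [] => 0
  | v :: t => if v = 1 then 1 + lead t else 0

theorem lead_nonneg (l : List Int) : 0 ≤ lead l := by
  induction l with
  | nil => simp [lead]
  | cons v t ih => simp only [lead]; split <;> omega

theorem mrc_nonneg (l : List Int) : ∀ c, 0 ≤ mrc l c := by
  induction l with
  | nil => intro c; simp [mrc]
  | cons v t ih =>
    intro c
    simp only [mrc]
    split
    · have := ih (c + 1); omega
    · exact ih 0

theorem goA_eq_loopFused (M : List (List Int)) (w : Int) (row col count longest : Int) :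
    findMaxInDiagGo M w row col count longest = loopFused (diagOf M w row col) count longest := by
  fun_induction findMaxInDiagGo M w row col count longest with
  | case1 => rw [diagOf]; simp_all [loopFused]
  | case2 => rw [diagOf]; simp_all [loopFused]
  | case3 r c cnt lg h hnone =>
    rw [diagOf]
    simp [h, hnone, loopFused]
  | case4 r c cnt lg h =>
    rw [diagOf]
    simp [h, loopFused]

theorem loopFused_eq_mrc (l : List Int) : ∀ c longest, 0 ≤ longest →
    loopFused l c longest = max longest (mrc l c) := by
  induction l with
  | nil => intro c longest h; simp only [loopFused, mrc]; omega
  | cons v t ih =>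
    intro c longest h
    simp only [loopFused, mrc]
    split
    · rw [ih (c + 1) (max longest (c + 1)) (by omega)]; omega
    · rw [ih 0 longest h]

-- peeling the leading run of 1s off mrc
theorem mrc_cons_one (t : List Int) : ∀ c,
    mrc (1 :: t) c = max (c + 1 + lead t) (mrc (t.drop (lead t).toNat) 0) := by
  induction t with
  | nil => intro c; norm_num [mrc, lead]
  | cons y t' ih =>
    intro c
    by_cases hy : y = 1
    · subst hy
      have h1 : mrc (1 :: 1 :: t') c = max (c + 1) (mrc (1 :: t') (c + 1)) := by
        simp [mrc]
      rw [h1, ih (c + 1)]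
      have hlt : lead (1 :: t') = 1 + lead t' := by simp [lead]
      have hln : 0 ≤ lead t' := lead_nonneg t'
      have hdrop : (1 :: t').drop (lead (1 :: t')).toNat = t'.drop (lead t').toNat := by
        rw [hlt]
        have : (1 + lead t').toNat = (lead t').toNat + 1 := by omega
        rw [this, List.drop_succ_cons]
      rw [hdrop, hlt]
      have := mrc_nonneg (t'.drop (lead t').toNat) 0
      omega
    · have h1 : mrc (1 :: y :: t') c = max (c + 1) (mrc t' 0) := by
        simp [mrc, hy]
      have hlt : lead (y :: t') = 0 := by simp [lead, hy]
      rw [h1, hlt]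
      have h2 : mrc ((y :: t').drop (0 : Int).toNat) 0 = mrc t' 0 := by
        simp [mrc, hy]
      rw [h2]
      omega

theorem skipOnes_eq_lead (d : List Int) (i : Int) (hi : 0 ≤ i) :
    skipOnes d i = i + lead (d.drop i.toNat) := by
  fun_induction skipOnes d i with
  | case1 j h ih =>
    obtain ⟨hj, hv⟩ := h
    have hj0 : 0 ≤ j := hi
    have hjn : j.toNat < d.length := by omega
    have hget : d[j.toNat] = 1 := by
      rw [PySem.List.pyGet?_eq_some_getElem d hj0 hj] at hv
      exact Option.some.injEq .. ▸ hv.symm ▸ rfl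
    have hdrop : d.drop j.toNat = 1 :: d.drop (j.toNat + 1) := by
      rw [List.drop_eq_getElem_cons hjn, hget]
    rw [ih (by omega), hdrop]
    have hsucc : (j + 1).toNat = j.toNat + 1 := by omega
    have hl : lead (1 :: d.drop (j.toNat + 1)) = 1 + lead (d.drop (j.toNat + 1)) := by
      simp [lead]
    rw [hsucc, hl]
    omega
  | case2 j h =>
    rcases Decidable.not_and_iff_not_or_not.mp h with hj | hv
    · have : d.length ≤ j.toNat := by omega
      simp [List.drop_eq_nil_of_le this, lead]
    · by_cases hjn : j < (d.length : Int)
      · have hjl : j.toNat < d.length := by omega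
        have hdrop : d.drop j.toNat = d[j.toNat] :: d.drop (j.toNat + 1) :=
          List.drop_eq_getElem_cons hjl
        have hne : d[j.toNat] ≠ 1 := by
          intro hc
          apply hv
          rw [PySem.List.pyGet?_eq_some_getElem d hi hjn, hc]
        rw [hdrop]; simp [lead, hne]
      · have : d.length ≤ j.toNat := by omega
        simp [List.drop_eq_nil_of_le this, lead]

theorem blockScan_eq_mrc (d : List Int) (i best : Int) :
    0 ≤ i → 0 ≤ best → blockScan d i best = max best (mrc (d.drop i.toNat) 0) := by
  fun_induction blockScan d i best with
  | case1 i best h h1 j ih =>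
    intro hi hb
    have hjdef : j = skipOnes d i := rfl
    have hjl : i.toNat < d.length := by omega
    have hget : d[i.toNat] = 1 := by
      rw [PySem.List.pyGet?_eq_some_getElem d hi h] at h1
      exact Option.some.injEq .. ▸ h1.symm ▸ rfl
    have hdrop : d.drop i.toNat = 1 :: d.drop (i.toNat + 1) := by
      rw [List.drop_eq_getElem_cons hjl, hget]
    have hln : 0 ≤ lead (d.drop (i.toNat + 1)) := lead_nonneg _
    have hskip : j = i + 1 + lead (d.drop (i.toNat + 1)) := by
      rw [hjdef, skipOnes_eq_lead d i hi, hdrop]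
      have hl : lead (1 :: d.drop (i.toNat + 1)) = 1 + lead (d.drop (i.toNat + 1)) := by
        simp [lead]
      rw [hl]
      omega
    simp only [dite_eq_ite] at ih
    rw [ih (by omega) (by split <;> omega)]
    have hjd : j.toNat = (lead (d.drop (i.toNat + 1))).toNat + (i.toNat + 1) := by omega
    have hdj : d.drop j.toNat
        = (d.drop (i.toNat + 1)).drop (lead (d.drop (i.toNat + 1))).toNat := by
      rw [List.drop_drop, hjd, Nat.add_comm]
    rw [hdj, hdrop, mrc_cons_one]
    have := mrc_nonneg ((d.drop (i.toNat + 1)).drop (lead (d.drop (i.toNat + 1))).toNat) 0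
    split <;> omega
  | case2 i best h h1 ih =>
    intro hi hb
    have hjl : i.toNat < d.length := by omega
    have hdrop : d.drop i.toNat = d[i.toNat] :: d.drop (i.toNat + 1) :=
      List.drop_eq_getElem_cons hjl
    have hne : d[i.toNat] ≠ 1 := by
      intro hc
      apply h1
      rw [PySem.List.pyGet?_eq_some_getElem d hi h, hc]
    have hsucc : (i + 1).toNat = i.toNat + 1 := by omega
    rw [ih (by omega) hb, hdrop, hsucc]
    simp [mrc, hne]
  | case3 i best h =>
    intro hi hb
    have : d.length ≤ i.toNat := by omega
    simp [List.drop_eq_nil_of_le this, mrc]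
    omega

-- ===== VERDICT (by name: the statement is the Claim_ definition above) =====
theorem findMaxInDiag_spec : Claim_equal_findMaxInDiag := by
  intro M row col _hdom _hpre
  unfold Spec_findMaxInDiag findMaxInDiag findMaxInDiag_alt
  rw [goA_eq_loopFused, loopFused_eq_mrc _ _ _ le_rfl,
      blockScan_eq_mrc _ _ _ le_rfl le_rfl]
  simp
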